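-- pv_equiv track=rewrite | github.com/KenjiItao/DemographicTransition | analysis_gapminder.py | get_line_numbers_concat
-- ===== SOURCE A (Python) =====
-- def get_line_numbers_concat(line_nums):
--     seq = []
--     final = []
--     last = 0
--
--     for index, val in enumerate(line_nums):
--         val = round(val)
--         if last + 1 == val or index == 0:
--             seq.append(val)
--             last = val
--         else:
--             if len(seq) > 1:
--                final.append(str(seq[0]) + '-' + str(seq[len(seq)-1]))
--             else:
--                final.append(str(seq[0]))
--             seq = []
--             seq.append(val)
--             last = val
--
--         if index == len(line_nums) - 1:
--             if len(seq) > 1: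
--                 final.append(str(seq[0]) + '-' + str(seq[len(seq)-1]))
--             else:
--                 final.append(str(seq[0]))
--
--     final_str = ', '.join(map(str, final))
--     return final_str
-- ===== SOURCE B (Python) =====
-- def get_line_numbers_concat(line_nums):
--     r = [round(v) for v in line_nums]
--     n = len(r)
--     if n == 0:
--         return ''
--     cuts = [i for i in range(1, n) if r[i] != r[i - 1] + 1]
--     pieces = []
--     for a, b in zip([0] + cuts, cuts + [n]):
--         pieces.append(str(r[a]) if b - a == 1 else str(r[a]) + '-' + str(r[b - 1]))
--     return ', '.join(pieces)
-- ===== Notes on version B (the rewrite author's own statement) =====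
-- stated objective: alternative
-- what changed: Replaces A's one-pass run-flushing state machine (seq/last/flag bookkeeping flushed at each break and at the last index) by staged passes: an index scan collecting the break positions, then a zip of the cut-position list with 0 prepended against the same list with n appended, rendered pair by pair.
import Mathlib
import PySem

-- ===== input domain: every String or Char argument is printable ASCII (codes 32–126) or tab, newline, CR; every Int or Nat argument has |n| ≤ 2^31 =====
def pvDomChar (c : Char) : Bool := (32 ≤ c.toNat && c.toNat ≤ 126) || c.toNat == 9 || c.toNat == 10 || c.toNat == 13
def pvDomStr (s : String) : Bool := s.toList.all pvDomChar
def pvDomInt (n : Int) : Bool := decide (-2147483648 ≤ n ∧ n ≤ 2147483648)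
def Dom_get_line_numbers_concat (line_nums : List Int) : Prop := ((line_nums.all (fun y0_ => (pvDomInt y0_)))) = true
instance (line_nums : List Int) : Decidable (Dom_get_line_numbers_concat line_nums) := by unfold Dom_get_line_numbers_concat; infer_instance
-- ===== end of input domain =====

-- B replaces A's one-pass run-flushing state machine by staged passes: an index scan that
-- collects the break positions, then a zip of the cut list (0 prepended) against it (n appended),
-- rendered pair by pair.

-- ===== PORT A =====
-- 'if len(seq) > 1: final.append(str(seq[0])+'-'+str(seq[-1])) else: final.append(str(seq[0]))'
-- (at every call site seq is nonempty, so headD/getLastD defaults are never read)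
def pvFlushA (seq : List Int) : String :=
  if seq.length > 1 then
    PySem.Int.toStr (seq.headD 0) ++ "-" ++ PySem.Int.toStr (seq.getLastD 0)
  else
    PySem.Int.toStr (seq.headD 0)

-- the 'for index, val in enumerate(line_nums)' loop, state (seq, final, last); round(val) = val on ints
def pvLoopA (n : Int) : List (Int × Int) → List Int → List String → Int → List String
  | [], _, final, _ => final
  | (i, v) :: rest, seq, final, last =>
    let st :=
      if last + 1 == v || i == 0 then (seq ++ [v], final, v)
      else ([v], final ++ [pvFlushA seq], v)
    let final' := if i == n - 1 then st.2.1 ++ [pvFlushA st.1] else st.2.1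
    pvLoopA n rest st.1 final' st.2.2

def get_line_numbers_concat (line_nums : List Int) : String :=
  PySem.Str.join ", " (pvLoopA (PySem.List.len line_nums) (PySem.List.enumerate line_nums) [] [] 0)

-- ===== PORT B =====
-- the comprehension condition 'r[i] != r[i - 1] + 1' (indices are always in range, so pyGetD's default is never read)
def pvBrk (r : List Int) (i : Int) : Bool := !(PySem.List.pyGetD r i 0 == PySem.List.pyGetD r (i - 1) 0 + 1)

-- 'cuts = [i for i in range(1, n) if r[i] != r[i - 1] + 1]'
def pvCutsB (r : List Int) : List Int :=
  (PySem.List.pyRange 1 (PySem.List.len r) 1).filter (pvBrk r)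

-- 'str(r[a]) if b - a == 1 else str(r[a]) + '-' + str(r[b - 1])'
def pvPieceB (r : List Int) (ab : Int × Int) : String :=
  if ab.2 - ab.1 == 1 then PySem.Int.toStr (PySem.List.pyGetD r ab.1 0)
  else PySem.Int.toStr (PySem.List.pyGetD r ab.1 0) ++ "-" ++ PySem.Int.toStr (PySem.List.pyGetD r (ab.2 - 1) 0)

def get_line_numbers_concat_alt (line_nums : List Int) : String :=
  let r := line_nums.map (fun v => v)   -- [round(v) for v in line_nums]; round is the identity on ints
  if PySem.List.len r == 0 then ""
  else
    let cuts := pvCutsB r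
    PySem.Str.join ", " (((0 :: cuts).zip (cuts ++ [PySem.List.len r])).map (pvPieceB r))

-- ===== PRECONDITION & SPEC =====
def Spec_get_line_numbers_concat (line_nums : List Int) (out : String) : Prop := out = get_line_numbers_concat_alt line_nums
instance (line_nums : List Int) (out : String) : Decidable (Spec_get_line_numbers_concat line_nums out) := by unfold Spec_get_line_numbers_concat; infer_instance

-- ===== CLAIM (what is proved, stated in full; the proofs are below) =====
def Claim_equal_get_line_numbers_concat : Prop := ∀ (line_nums : List Int), Dom_get_line_numbers_concat line_nums → Spec_get_line_numbers_concat line_nums (get_line_numbers_concat line_nums)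

-- ===== LEMMAS AND PROOFS =====

-- canonical run decomposition both ports are reduced to
def pvTakeC (prev : Int) : List Int → List Int
  | [] => []
  | v :: vs => if v = prev + 1 then v :: pvTakeC v vs else []

def pvDropC (prev : Int) : List Int → List Int
  | [] => []
  | v :: vs => if v = prev + 1 then pvDropC v vs else v :: vs

def pvRuns (prev : Int) (cur : List Int) : List Int → List (List Int)
  | [] => [cur]
  | v :: vs => if v = prev + 1 then pvRuns v (cur ++ [v]) vs else cur :: pvRuns v [v] vs

def pvRenderB (run : List Int) : String :=
  if run.length == 1 then PySem.Int.toStr (run.headD 0)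
  else PySem.Int.toStr (run.headD 0) ++ "-" ++ PySem.Int.toStr (run.getLastD 0)

theorem pvFlushA_eq_render (seq : List Int) (h : seq ≠ []) : pvFlushA seq = pvRenderB seq := by
  unfold pvFlushA pvRenderB
  rcases seq with _ | ⟨a, rest⟩
  · simp at h
  · rcases rest with _ | ⟨b, rest'⟩ <;> simp

-- A-side: the loop, after index 0, renders the canonical runs
theorem pvLoopA_run (vs' : List Int) : ∀ (v i : Int) (seq : List Int) (final : List String) (last n : Int),
    0 < i → i + 1 + (vs'.length : Int) = n → seq ≠ [] →
    pvLoopA n ((i, v) :: PySem.List.enumerate vs' (i + 1)) seq final last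
      = final ++ ((pvRuns last seq (v :: vs')).map pvRenderB) := by
  induction vs' with
  | nil =>
    intro v i seq final last n hi hn hseq
    have hin : (i == n - 1) = true := by simp at hn ⊢; omega
    have hi0 : (i == 0) = false := by simp; omega
    by_cases hv : last + 1 = v
    · have hb : (last + 1 == v) = true := by simpa using hv
      simp only [PySem.List.enumerate_nil, pvLoopA, hin, hi0, hb, Bool.or_false, if_true]
      rw [pvFlushA_eq_render (seq ++ [v]) (by simp)]
      simp [pvRuns, hv, List.map]
    · have hb : (last + 1 == v) = false := by simpa using hv
      have hv' : ¬ (v = last + 1) := fun h => hv h.symm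
      simp only [PySem.List.enumerate_nil, pvLoopA, hin, hi0, hb, Bool.or_false,
        Bool.false_eq_true, if_false, if_true]
      rw [pvFlushA_eq_render seq hseq, pvFlushA_eq_render [v] (by simp)]
      simp [pvRuns, if_neg hv', List.map]
  | cons w ws ih =>
    intro v i seq final last n hi hn hseq
    have hin : (i == n - 1) = false := by simp at hn ⊢; omega
    have hi0 : (i == 0) = false := by simp; omega
    by_cases hv : last + 1 = v
    · have hb : (last + 1 == v) = true := by simpa using hv
      simp only [pvLoopA, hin, hi0, hb, Bool.or_false, Bool.false_eq_true, if_false, if_true]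
      rw [PySem.List.enumerate_cons]
      rw [ih w (i + 1) (seq ++ [v]) final v n (by omega) (by simp at hn; omega) (by simp)]
      simp [pvRuns, hv]
    · have hb : (last + 1 == v) = false := by simpa using hv
      have hv' : ¬ (v = last + 1) := fun h => hv h.symm
      simp only [pvLoopA, hin, hi0, hb, Bool.or_false, Bool.false_eq_true, if_false]
      rw [PySem.List.enumerate_cons]
      rw [ih w (i + 1) [v] (final ++ [pvFlushA seq]) v n (by omega) (by simp at hn; omega) (by simp)]
      rw [pvFlushA_eq_render seq hseq]
      simp [pvRuns, if_neg hv']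

-- chain split facts for pvTakeC/pvDropC
theorem pvTake_append_drop (vs : List Int) : ∀ p, pvTakeC p vs ++ pvDropC p vs = vs := by
  induction vs with
  | nil => intro p; simp [pvTakeC, pvDropC]
  | cons v vs ih =>
    intro p
    by_cases hv : v = p + 1
    · simp [pvTakeC, pvDropC, hv, ih]
    · simp [pvTakeC, pvDropC, hv]

theorem pvTake_chain (vs : List Int) : ∀ p, List.IsChain (fun a b => b = a + 1) (p :: pvTakeC p vs) := by
  induction vs with
  | nil => intro p; simp [pvTakeC]
  | cons v vs ih =>
    intro p
    by_cases hv : v = p + 1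
    · simp only [pvTakeC, if_pos hv]
      exact (ih v).cons (by simp [hv])
    · simp [pvTakeC, hv]

theorem pvDrop_break (vs : List Int) : ∀ p w ws, pvDropC p vs = w :: ws →
    w ≠ (p :: pvTakeC p vs).getLastD 0 + 1 := by
  induction vs with
  | nil => intro p w ws h; simp [pvDropC] at h
  | cons v vs ih =>
    intro p w ws h
    by_cases hv : v = p + 1
    · simp only [pvDropC, if_pos hv] at h
      have := ih v w ws h
      simpa [pvTakeC, if_pos hv] using this
    · simp only [pvDropC, if_neg hv] at h
      simp only [pvTakeC, if_neg hv]
      injection h with h1 h2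
      subst h1
      simpa using hv

-- pvRuns splits off the first maximal chain (restated from the canonical decomposition)
theorem pvRuns_eq_chain (vs : List Int) : ∀ (prev : Int) (cur : List Int),
    pvRuns prev cur vs
      = (cur ++ pvTakeC prev vs) ::
          (match pvDropC prev vs with
           | [] => []
           | w :: ws => pvRuns w [w] ws) := by
  induction vs with
  | nil => intro prev cur; simp [pvRuns, pvTakeC, pvDropC]
  | cons v vs ih =>
    intro prev cur
    by_cases hv : v = prev + 1
    · simp only [pvRuns, pvTakeC, pvDropC, if_pos hv]
      rw [ih v (cur ++ [v])]
      simp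
    · simp only [pvRuns, pvTakeC, pvDropC, if_neg hv]
      rw [ih v [v]]
      simp

-- B-side index/arithmetic helpers and split lemmas ------------------------

theorem pvGetD_append_left (xs ys : List Int) (k : Nat) (h : k < xs.length) :
    (xs ++ ys).getD k 0 = xs.getD k 0 := by
  simp [List.getD_eq_getElem?_getD, List.getElem?_append_left h]

theorem pvGetD_append_right (xs ys : List Int) (k : Nat) :
    (xs ++ ys).getD (xs.length + k) 0 = ys.getD k 0 := by
  simp [List.getD_eq_getElem?_getD, List.getElem?_append_right]

theorem pvGetD_last (c : List Int) (h : c ≠ []) : c.getD (c.length - 1) 0 = c.getLastD 0 := by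
  have hl : c.length - 1 < c.length := by
    have := List.length_pos_iff.mpr h; omega
  rw [List.getLastD_eq_getLast?, List.getLast?_eq_getElem?, List.getD_eq_getElem?_getD]

-- Brk at a shifted interior index reads only s
theorem pvBrk_shift (c s : List Int) (k : Nat) :
    pvBrk (c ++ s) ((c.length : Int) + 1 + (k : Int)) = pvBrk s (1 + (k : Int)) := by
  have h1 : ((c.length : Int) + 1 + (k : Int)) = ((c.length + (k + 1) : Nat) : Int) := by push_cast; ring
  have h2 : (((c.length + (k + 1) : Nat) : Int)) - 1 = ((c.length + k : Nat) : Int) := by push_cast; ring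
  have h3 : (1 : Int) + (k : Int) = ((k + 1 : Nat) : Int) := by push_cast; ring
  have h4 : (((k + 1 : Nat) : Int)) - 1 = ((k : Nat) : Int) := by push_cast; ring
  unfold pvBrk
  rw [h1, h2, h3, h4]
  simp only [PySem.List.pyGetD_natCast]
  rw [pvGetD_append_right, pvGetD_append_right]

theorem pvChain_getD (c : List Int) (hc : List.IsChain (fun a b => b = a + 1) c)
    (k : Nat) (hk : k + 1 < c.length) : c.getD (k + 1) 0 = c.getD k 0 + 1 := by
  have := List.IsChain.getElem hc k hk
  rw [List.getD_eq_getElem?_getD, List.getD_eq_getElem?_getD,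
    List.getElem?_eq_getElem hk, List.getElem?_eq_getElem (by omega)]
  simpa using this

-- interior of the chain: no cut
theorem pvCuts_chain_nil (c s : List Int) (hc : List.IsChain (fun a b => b = a + 1) c) :
    (PySem.List.pyRange 1 (c.length : Int) 1).filter (pvBrk (c ++ s)) = [] := by
  rw [PySem.List.pyRange_one]
  rw [List.filter_map]
  rw [List.filter_eq_nil_iff.mpr, List.map_nil]
  intro k hk
  rw [List.mem_range] at hk
  have hk' : k + 1 < c.length := by omega
  have h1 : (1 : Int) + (k : Int) = ((k + 1 : Nat) : Int) := by push_cast; ring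
  have h2 : (((k + 1 : Nat) : Int)) - 1 = ((k : Nat) : Int) := by push_cast; ring
  simp only [Function.comp, pvBrk, h1, h2, PySem.List.pyGetD_natCast]
  rw [pvGetD_append_left _ _ _ hk', pvGetD_append_left _ _ _ (by omega)]
  rw [pvChain_getD c hc k hk']
  simp

-- junction: a cut
theorem pvBrk_junction (c : List Int) (hc0 : c ≠ []) (w : Int) (ws : List Int)
    (hbr : w ≠ c.getLastD 0 + 1) :
    pvBrk (c ++ w :: ws) ((c.length : Int)) = true := by
  have h1 : ((c.length : Int)) = ((c.length + 0 : Nat) : Int) := by push_cast; ring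
  have h2 : ((c.length + 0 : Nat) : Int) - 1 = ((c.length - 1 : Nat) : Int) := by
    have := List.length_pos_iff.mpr hc0; push_cast [this]; omega
  unfold pvBrk
  rw [h1, h2]
  simp only [PySem.List.pyGetD_natCast]
  rw [pvGetD_append_right, pvGetD_append_left _ _ _ (by have := List.length_pos_iff.mpr hc0; omega)]
  rw [pvGetD_last c hc0]
  simpa using hbr

-- tail: cuts of s, shifted by |c|
theorem pvCuts_shift (c : List Int) (w : Int) (ws : List Int) :
    (PySem.List.pyRange ((c.length : Int) + 1) ((c.length : Int) + ((ws.length : Int) + 1)) 1).filter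
        (pvBrk (c ++ w :: ws))
      = (pvCutsB (w :: ws)).map (· + (c.length : Int)) := by
  unfold pvCutsB
  rw [PySem.List.pyRange_one, PySem.List.pyRange_one]
  have e1 : ((c.length : Int) + ((ws.length : Int) + 1) - ((c.length : Int) + 1)).toNat = ws.length := by omega
  have e2 : ((PySem.List.len (w :: ws)) - 1).toNat = ws.length := by simp [PySem.List.len_eq]
  rw [e1, e2]
  rw [List.filter_map, List.filter_map, List.map_map]
  have hfil : (List.range ws.length).filter ((pvBrk (c ++ w :: ws)) ∘ (fun k : Nat => (c.length : Int) + 1 + (k : Int)))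
      = (List.range ws.length).filter ((pvBrk (w :: ws)) ∘ (fun k : Nat => 1 + (k : Int))) := by
    apply List.filter_congr
    intro k _
    simp only [Function.comp]
    exact pvBrk_shift c (w :: ws) k
  rw [hfil]
  apply List.map_congr_left
  intro k _
  simp only [Function.comp]
  ring

theorem pvCuts_split (c s : List Int) (hc0 : c ≠ [])
    (hc : List.IsChain (fun a b => b = a + 1) c)
    (hbr : ∀ w ws, s = w :: ws → w ≠ c.getLastD 0 + 1) :
    pvCutsB (c ++ s) = if s = [] then []
      else ((c.length : Int)) :: (pvCutsB s).map (· + (c.length : Int)) := by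
  have hm : 0 < c.length := List.length_pos_iff.mpr hc0
  cases s with
  | nil =>
    unfold pvCutsB
    have : PySem.List.len (c ++ []) = ((c.length : Nat) : Int) := by simp [PySem.List.len_eq]
    rw [this]
    exact pvCuts_chain_nil c [] hc
  | cons w ws =>
    rw [if_neg (by simp)]
    unfold pvCutsB
    have hlen : PySem.List.len (c ++ w :: ws) = ((c.length : Int) + ((ws.length : Int) + 1)) := by
      simp [PySem.List.len_eq]
    rw [hlen]
    rw [PySem.List.pyRange_one_append 1 (c.length : Int) _ (by omega) (by omega)]
    rw [List.filter_append]
    rw [pvCuts_chain_nil c (w :: ws) hc]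
    rw [PySem.List.pyRange_one_cons (by omega)]
    rw [List.filter_cons_of_pos (pvBrk_junction c hc0 w ws (hbr w ws rfl))]
    rw [pvCuts_shift c w ws]
    rw [List.nil_append]
    have h2 : PySem.List.len (w :: ws) = ((ws.length : Int) + 1) := by
      simp [PySem.List.len_eq]
    unfold pvCutsB
    rw [h2]

theorem pvShiftIdx (c s : List Int) (j : Int) (h0 : 0 ≤ j) (_h1 : j < (s.length : Int)) :
    PySem.List.pyGetD (c ++ s) (j + (c.length : Int)) 0 = PySem.List.pyGetD s j 0 := by
  have e1 : j + (c.length : Int) = ((c.length + j.toNat : Nat) : Int) := by push_cast; omega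
  have e2 : j = ((j.toNat : Nat) : Int) := by omega
  rw [e1, e2, PySem.List.pyGetD_natCast, PySem.List.pyGetD_natCast]
  exact pvGetD_append_right c s j.toNat

theorem pvPiece_head (c s : List Int) (hc0 : c ≠ []) :
    pvPieceB (c ++ s) (0, (c.length : Int)) = pvRenderB c := by
  have hm : 0 < c.length := List.length_pos_iff.mpr hc0
  have h0 : PySem.List.pyGetD (c ++ s) 0 0 = c.headD 0 := by
    rw [PySem.List.pyGetD_zero, pvGetD_append_left c s 0 hm]
    cases c with
    | nil => simp at hc0
    | cons a t => simp
  have hL : PySem.List.pyGetD (c ++ s) ((c.length : Int) - 1) 0 = c.getLastD 0 := by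
    have e : (c.length : Int) - 1 = ((c.length - 1 : Nat) : Int) := by omega
    rw [e, PySem.List.pyGetD_natCast, pvGetD_append_left c s _ (by omega), pvGetD_last c hc0]
  unfold pvPieceB pvRenderB
  simp only [h0, hL]
  by_cases h1 : c.length = 1
  · rw [if_pos (by simp [h1]), if_pos (by simp [h1])]
  · rw [if_neg (by simp; omega), if_neg (by simp [h1])]

theorem pvShiftPiece (c s : List Int) (a b : Int) (ha0 : 0 ≤ a) (ha1 : a < (s.length : Int))
    (hb0 : 1 ≤ b) (hb1 : b ≤ (s.length : Int)) :
    pvPieceB (c ++ s) (a + (c.length : Int), b + (c.length : Int)) = pvPieceB s (a, b) := by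
  unfold pvPieceB
  have e1 : b + (c.length : Int) - (a + (c.length : Int)) = b - a := by ring
  have e2 : b + (c.length : Int) - 1 = (b - 1) + (c.length : Int) := by ring
  simp only [e1, e2]
  rw [pvShiftIdx c s a ha0 ha1, pvShiftIdx c s (b - 1) (by omega) (by omega)]

theorem pvMem_cuts (s : List Int) (i : Int) (h : i ∈ pvCutsB s) : 1 ≤ i ∧ i < (s.length : Int) := by
  unfold pvCutsB at h
  have := List.mem_of_mem_filter h
  rw [PySem.List.mem_pyRange_one] at this
  simpa [PySem.List.len_eq] using this

theorem pvPieces_split (c s : List Int) (hc0 : c ≠ [])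
    (hc : List.IsChain (fun a b => b = a + 1) c)
    (hbr : ∀ w ws, s = w :: ws → w ≠ c.getLastD 0 + 1) :
    ((0 :: pvCutsB (c ++ s)).zip (pvCutsB (c ++ s) ++ [PySem.List.len (c ++ s)])).map (pvPieceB (c ++ s))
      = pvRenderB c ::
        (if s = [] then []
         else ((0 :: pvCutsB s).zip (pvCutsB s ++ [PySem.List.len s])).map (pvPieceB s)) := by
  have hm : 0 < c.length := List.length_pos_iff.mpr hc0
  rw [pvCuts_split c s hc0 hc hbr]
  cases s with
  | nil =>
    have hlen : PySem.List.len (c ++ []) = (c.length : Int) := by simp [PySem.List.len_eq]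
    rw [hlen]
    have hh := pvPiece_head c [] hc0
    simp only [List.append_nil] at hh
    simp [hh]
  | cons w ws =>
    rw [if_neg (by simp), if_neg (by simp)]
    have hlen : PySem.List.len (c ++ w :: ws) = ((w :: ws).length : Int) + (c.length : Int) := by
      simp [PySem.List.len_eq]; ring
    have hlen2 : PySem.List.len (w :: ws) = ((w :: ws).length : Int) := by simp [PySem.List.len_eq]
    rw [hlen, hlen2]
    have hmap1 : (c.length : Int) :: (pvCutsB (w :: ws)).map (· + (c.length : Int))
        = ((0 :: pvCutsB (w :: ws)).map (· + (c.length : Int))) := by simp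
    have hmap2 : (pvCutsB (w :: ws)).map (· + (c.length : Int)) ++ [((w :: ws).length : Int) + (c.length : Int)]
        = (pvCutsB (w :: ws) ++ [((w :: ws).length : Int)]).map (· + (c.length : Int)) := by simp
    rw [List.cons_append, List.zip_cons_cons, List.map_cons, pvPiece_head c (w :: ws) hc0]
    congr 1
    rw [hmap1, hmap2, List.zip_map, List.map_map]
    apply List.map_congr_left
    intro ab hab
    obtain ⟨ha, hb⟩ := List.of_mem_zip hab
    have hcuts : ∀ i ∈ pvCutsB (w :: ws), 1 ≤ i ∧ i < (ws.length : Int) + 1 := by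
      intro i hi
      have := pvMem_cuts _ _ hi
      simpa using this
    have hab1 : 0 ≤ ab.1 ∧ ab.1 < (ws.length : Int) + 1 := by
      rcases List.mem_cons.mp ha with h | h
      · exact ⟨by omega, by omega⟩
      · have := hcuts _ h
        exact ⟨by omega, by omega⟩
    have hab2 : 1 ≤ ab.2 ∧ ab.2 ≤ (ws.length : Int) + 1 := by
      rcases List.mem_append.mp hb with h | h
      · have := hcuts _ h
        exact ⟨by omega, by omega⟩
      · simp at h
        exact ⟨by omega, by omega⟩
    simp only [Function.comp, Prod.map]
    exact pvShiftPiece c (w :: ws) ab.1 ab.2 hab1.1 (by simpa using hab1.2)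
      hab2.1 (by simpa using hab2.2)

theorem pvDropC_length (prev : Int) (vs : List Int) : (pvDropC prev vs).length ≤ vs.length := by
  induction vs generalizing prev with
  | nil => simp [pvDropC]
  | cons v vs ih =>
    simp only [pvDropC]
    split
    · exact le_trans (ih v) (Nat.le_succ _)
    · simp

-- main B-side lemma: pieces = rendered canonical runs
theorem pvPiecesB_eq_aux (N : Nat) : ∀ (vs : List Int), vs.length ≤ N → ∀ (v : Int),
    ((0 :: pvCutsB (v :: vs)).zip (pvCutsB (v :: vs) ++ [PySem.List.len (v :: vs)])).map (pvPieceB (v :: vs))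
      = (pvRuns v [v] vs).map pvRenderB := by
  induction N with
  | zero =>
    intro vs hvs v
    have : vs = [] := List.length_eq_zero_iff.mp (Nat.le_zero.mp hvs)
    subst this
    have h := pvPieces_split [v] [] (by simp) (by simp) (by simp)
    simp only [List.cons_append, List.nil_append] at h
    rw [h]
    simp [pvRuns, pvRenderB]
  | succ N ih =>
    intro vs hvs v
    have hsplit : (v :: pvTakeC v vs) ++ pvDropC v vs = v :: vs := by
      rw [List.cons_append, pvTake_append_drop]
    rw [← hsplit]
    rw [pvPieces_split (v :: pvTakeC v vs) (pvDropC v vs) (by simp) (pvTake_chain vs v)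
      (fun w ws h => pvDrop_break vs v w ws h)]
    rw [pvRuns_eq_chain vs v [v]]
    rw [List.map_cons]
    simp only [List.cons_append, List.nil_append]
    congr 1
    have hd := pvDropC_length v vs
    cases hdc : pvDropC v vs with
    | nil => simp
    | cons w ws =>
      rw [if_neg (by simp)]
      rw [ih ws (by rw [hdc] at hd; simp at hd; omega) w]

-- A's loop on a nonempty list renders the canonical runs
theorem pvLoopA_full (v : Int) (vs : List Int) :
    pvLoopA (PySem.List.len (v :: vs)) (PySem.List.enumerate (v :: vs)) [] [] 0
      = (pvRuns v [v] vs).map pvRenderB := by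
  rw [PySem.List.enumerate_cons]
  cases vs with
  | nil =>
    have h0 : ((0 : Int) == PySem.List.len [v] - 1) = true := by
      simp [PySem.List.len_eq]
    simp only [pvLoopA, PySem.List.enumerate_nil, h0, if_true, beq_self_eq_true,
      Bool.or_true, List.nil_append]
    rw [pvFlushA_eq_render [v] (by simp)]
    simp [pvRuns]
  | cons w ws =>
    have h0 : ((0 : Int) == PySem.List.len (v :: w :: ws) - 1) = false := by
      simp [PySem.List.len_eq]; omega
    simp only [pvLoopA, h0, beq_self_eq_true, Bool.or_true, if_true, Bool.false_eq_true,
      if_false, List.nil_append]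
    rw [PySem.List.enumerate_cons]
    simp only [zero_add]
    rw [pvLoopA_run ws w 1 [v] [] v _ (by norm_num)
      (by simp [PySem.List.len_eq]; omega) (by simp)]
    simp

theorem get_line_numbers_concat_spec : Claim_equal_get_line_numbers_concat := by
  intro line_nums _
  unfold Spec_get_line_numbers_concat get_line_numbers_concat get_line_numbers_concat_alt
  cases line_nums with
  | nil => simp [PySem.List.enumerate_nil, pvLoopA, PySem.Str.join]
  | cons v vs =>
    simp only [List.map_id_fun', id]
    have h0 : (PySem.List.len (v :: vs) == 0) = false := by simp [PySem.List.len_eq]; omega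
    simp only [h0, Bool.false_eq_true, if_false]
    rw [pvLoopA_full v vs, pvPiecesB_eq_aux vs.length vs le_rfl v]
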